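-- pv_equiv track=rewrite | github.com/ravichrn/Coding-Questions | findBestSeats.py | findBestSeats
-- ===== SOURCE A (Python) =====
-- def findBestSeats(seats):
--     prev_seat=0
--     max_dist=0
--     max_index=0
--     next_seat=0
--     num=0
--     for index, val in enumerate(seats):
--         if val:
--             prev_seat=0
--         else:
--             prev_seat+=1
--             num=0
--             for i in seats[index+1:]:
--                 while not i:
--                     num+=1
--                     break
--                 else:
--                     break
--
--         dist = max(prev_seat, num)
--         if dist>max_dist:
--             max_dist = dist
--             max_index = index
--     return max_index
-- ===== SOURCE B (Python) =====
-- def findBestSeats(seats):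
--     best_len = 0
--     best_idx = 0
--     run = 0
--     for i, v in enumerate(seats):
--         if v == 0:
--             run += 1
--             if run > best_len:
--                 best_len = run
--                 best_idx = i
--         else:
--             run = 0
--     return best_idx
-- ===== Notes on version B (the rewrite author's own statement) =====
-- stated objective: faster
-- what changed: Replaces the per-seat inner scan of the whole suffix (and the lookahead 'num' state) with a single forward pass that tracks the current empty run and the end index of the first longest run.
import Mathlib
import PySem

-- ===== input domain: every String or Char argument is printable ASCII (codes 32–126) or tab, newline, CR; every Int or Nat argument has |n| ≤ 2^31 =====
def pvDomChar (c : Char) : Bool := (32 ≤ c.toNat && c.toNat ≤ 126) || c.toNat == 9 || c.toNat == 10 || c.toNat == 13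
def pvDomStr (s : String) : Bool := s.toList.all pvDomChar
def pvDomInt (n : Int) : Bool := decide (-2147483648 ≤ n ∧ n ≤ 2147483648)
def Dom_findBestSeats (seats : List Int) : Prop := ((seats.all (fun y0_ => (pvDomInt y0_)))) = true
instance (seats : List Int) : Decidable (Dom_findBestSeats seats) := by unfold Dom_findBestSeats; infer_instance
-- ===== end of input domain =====

-- B replaces A's per-seat rescan of the suffix by a single forward pass tracking the
-- current empty run and the end index of the first longest run (objective: faster).

-- ===== PORT A =====
-- inner loop 'for i in seats[index+1:]: while not i: num+=1; break / else: break':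
-- counts leading zeros of the suffix into num
def pvInnerA : List Int → Int → Int
  | [], num => num
  | i :: rest, num => if i ≠ 0 then num else pvInnerA rest (num + 1)

-- one iteration of A's main loop: state (prev_seat, max_dist, max_index, num), entry (index, val);
-- 'rest' is seats[index+1:] (supplied by the caller via PySem.List.slice)
def pvStepA (rest : List Int) (s : Int × Int × Int × Int) (kv : Int × Int) : Int × Int × Int × Int :=
  let prev := if kv.2 ≠ 0 then 0 else s.1 + 1
  let num := if kv.2 ≠ 0 then s.2.2.2 else pvInnerA rest 0
  let dist := max prev num
  if dist > s.2.1 then (prev, dist, kv.1, num) else (prev, s.2.1, s.2.2.1, num)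

def findBestSeats (seats : List Int) : Int :=
  ((PySem.List.enumerate seats).foldl
    (fun s kv => pvStepA (PySem.List.slice seats (some (kv.1 + 1)) none) s kv)
    (0, 0, 0, 0)).2.2.1

-- ===== PORT B =====
-- one iteration of B's loop: state (best_len, best_idx, run), entry (i, v)
def pvStepB (s : Int × Int × Int) (kv : Int × Int) : Int × Int × Int :=
  if kv.2 == 0 then
    if s.2.2 + 1 > s.1 then (s.2.2 + 1, kv.1, s.2.2 + 1) else (s.1, s.2.1, s.2.2 + 1)
  else (s.1, s.2.1, 0)

def findBestSeats_alt (seats : List Int) : Int :=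
  ((PySem.List.enumerate seats).foldl pvStepB (0, 0, 0)).2.1

-- ===== PRECONDITION & SPEC =====
def Spec_findBestSeats (seats : List Int) (out : Int) : Prop := out = findBestSeats_alt seats
instance (seats : List Int) (out : Int) : Decidable (Spec_findBestSeats seats out) := by unfold Spec_findBestSeats; infer_instance

-- ===== CLAIM (what is proved, stated in full; the proofs are below) =====
def Claim_equal_findBestSeats : Prop := ∀ (seats : List Int), Dom_findBestSeats seats → Spec_findBestSeats seats (findBestSeats seats)

-- ===== LEMMAS AND PROOFS =====

-- number of leading zeros of a list
def pvLz : List Int → Int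
  | [] => 0
  | x :: r => if x = 0 then 1 + pvLz r else 0

lemma pvLz_nonneg (xs : List Int) : 0 ≤ pvLz xs := by
  induction xs with
  | nil => simp [pvLz]
  | cons x r ih => simp only [pvLz]; split <;> omega

lemma pvInnerA_eq (xs : List Int) : ∀ num : Int, pvInnerA xs num = num + pvLz xs := by
  induction xs with
  | nil => intro num; simp [pvInnerA, pvLz]
  | cons x r ih =>
    intro num
    simp only [pvInnerA, pvLz]
    by_cases hx : x = 0
    · simp [hx, ih]; ring
    · simp [hx]

-- A's fold over enumerate, rewritten as structural recursion with the true suffix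
def pvGoA : List Int → Int → (Int × Int × Int × Int) → (Int × Int × Int × Int)
  | [], _, s => s
  | v :: r, k, s => pvGoA r (k + 1) (pvStepA r s (k, v))

lemma pvFoldA_eq (seats : List Int) :
    ∀ (xs : List Int) (k : Int) (s : Int × Int × Int × Int),
      0 ≤ k → seats.drop k.toNat = xs →
      (PySem.List.enumerate xs k).foldl
        (fun s kv => pvStepA (PySem.List.slice seats (some (kv.1 + 1)) none) s kv) s
      = pvGoA xs k s := by
  intro xs
  induction xs with
  | nil => intro k s hk hd; simp [PySem.List.enumerate_nil, pvGoA]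
  | cons v r ih =>
    intro k s hk hd
    have hd' : seats.drop (k + 1).toNat = r := by
      have h1 : (k + 1).toNat = k.toNat + 1 := by omega
      rw [h1, ← List.tail_drop, hd, List.tail_cons]
    have hsl : PySem.List.slice seats (some (k + 1)) none = r := by
      rw [PySem.List.slice_from seats (by omega)]; exact hd'
    rw [PySem.List.enumerate_cons, List.foldl_cons, ih (k + 1) _ (by omega) hd']
    simp only [pvGoA, hsl]

-- the joint invariant induction: A's state vs B's state over the same remainder
lemma pvGoA_eq_foldB :
    ∀ (xs : List Int) (k prev maxd maxi num best bidx run : Int),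
      prev = run → num ≤ maxd → 0 ≤ run → run ≤ best →
      (run = 0 → maxd = best ∧ maxi = bidx) →
      (run ≠ 0 → maxd = max best (run + pvLz xs - 1) ∧ (run + pvLz xs ≤ best → maxi = bidx)) →
      (pvGoA xs k (prev, maxd, maxi, num)).2.2.1
        = ((PySem.List.enumerate xs k).foldl pvStepB (best, bidx, run)).2.1 := by
  intro xs
  induction xs with
  | nil =>
    intro k prev maxd maxi num best bidx run h1 h2 h3 h4 h5 h6
    simp only [pvGoA, PySem.List.enumerate_nil, List.foldl_nil]
    by_cases hr : run = 0
    · exact (h5 hr).2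
    · exact (h6 hr).2 (by simp [pvLz] at *; omega)
  | cons v r ih =>
    intro k prev maxd maxi num best bidx run h1 h2 h3 h4 h5 h6
    have hc' : 0 ≤ pvLz r := pvLz_nonneg r
    rw [PySem.List.enumerate_cons, List.foldl_cons]
    simp only [pvGoA]
    by_cases hv : v = 0
    · -- empty seat: prev_seat increments, num is recomputed as the leading zeros of r
      have hlz : pvLz (v :: r) = 1 + pvLz r := by simp [pvLz, hv]
      rw [hlz] at h6
      simp only [pvStepA, pvStepB, hv, ne_eq, not_true_eq_false, if_false,
        beq_self_eq_true, if_true, pvInnerA_eq, zero_add]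
      by_cases hr : run = 0
      · obtain ⟨e1, e2⟩ := h5 hr
        split_ifs with hA hB hB <;>
          exact ih (k + 1) _ _ _ _ _ _ _ (by omega) (by omega) (by omega) (by omega)
            (fun h => ⟨by omega, by omega⟩)
            (fun h => ⟨by omega, fun hcond => by omega⟩)
      · obtain ⟨e1, e2⟩ := h6 hr
        split_ifs with hA hB hB <;>
          exact ih (k + 1) _ _ _ _ _ _ _ (by omega) (by omega) (by omega) (by omega)
            (fun h => ⟨by omega, by omega⟩)
            (fun h => ⟨by omega, fun hcond => by omega⟩)
    · -- occupied seat: dist = max 0 num ≤ max_dist, so A's maximum never moves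
      have hlz : pvLz (v :: r) = 0 := by simp [pvLz, hv]
      rw [hlz] at h6
      obtain ⟨hm1, hm2⟩ : maxd = best ∧ maxi = bidx := by
        by_cases hr : run = 0
        · exact h5 hr
        · obtain ⟨e1, e2⟩ := h6 hr
          exact ⟨by omega, e2 (by omega)⟩
      have hnA : ¬ (max (0 : Int) num > maxd) := by omega
      simp only [pvStepA, pvStepB, hv, ne_eq, not_false_eq_true, if_true, beq_iff_eq, if_neg hnA]
      exact ih (k + 1) _ _ _ _ _ _ _ (by omega) (by omega) (by omega) (by omega)
        (fun _ => ⟨by omega, by omega⟩) (fun h => absurd rfl h)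

-- ===== VERDICT (by name: the statement is the Claim_ definition above) =====
theorem findBestSeats_spec : Claim_equal_findBestSeats := by
  intro seats _
  unfold Spec_findBestSeats findBestSeats findBestSeats_alt
  rw [pvFoldA_eq seats seats 0 (0, 0, 0, 0) (by omega) (by simp)]
  exact pvGoA_eq_foldB seats 0 0 0 0 0 0 0 0 rfl (by omega) (by omega) (by omega)
    (fun _ => ⟨rfl, rfl⟩) (fun h => absurd rfl h)
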